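-- pv_equiv track=rewrite | github.com/alexwday/aegis | src/aegis/etls/call_summary_editor_mock/main_call_summary.py | _fallback_qa_grouping
-- ===== SOURCE A (Python) =====
-- from typing import Any, Dict, List, Optional, Tuple
--
-- def _fallback_qa_grouping(qa_raw_blocks: List[Dict]) -> List[List[Dict]]:
--     """Fallback: group by consecutive q→a blocks using FactSet type hints."""
--     conversations = []
--     i = 0
--     while i < len(qa_raw_blocks):
--         blk = qa_raw_blocks[i]
--         if blk["speaker_type_hint"] == "q":
--             group = [blk]
--             j = i + 1
--             while j < len(qa_raw_blocks) and qa_raw_blocks[j]["speaker_type_hint"] == "a":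
--                 group.append(qa_raw_blocks[j])
--                 j += 1
--             conversations.append(group)
--             i = j
--         else:
--             i += 1
--     return conversations
-- ===== SOURCE B (Python) =====
-- from typing import Dict, List
--
-- def _fallback_qa_grouping(qa_raw_blocks: List[Dict]) -> List[List[Dict]]:
--     """Single flat pass keeping a mutable current group instead of nested index loops."""
--     conversations = []
--     current = None
--     for blk in qa_raw_blocks:
--         hint = blk["speaker_type_hint"]
--         if hint == "q":
--             if current is not None:
--                 conversations.append(current)
--             current = [blk]
--         elif hint == "a":
--             if current is not None:
--                 current.append(blk)
--         else:
--             if current is not None: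
--                 conversations.append(current)
--             current = None
--     if current is not None:
--         conversations.append(current)
--     return conversations
-- ===== Notes on version B (the rewrite author's own statement) =====
-- stated objective: simpler
-- what changed: Replaced the nested while-loops with index jumping (i = j after an inner scan of following 'a' blocks) by one flat for-loop over the blocks that maintains an optional current group, flushed on a new 'q', a non-'a' block, or at the end.
import Mathlib
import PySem

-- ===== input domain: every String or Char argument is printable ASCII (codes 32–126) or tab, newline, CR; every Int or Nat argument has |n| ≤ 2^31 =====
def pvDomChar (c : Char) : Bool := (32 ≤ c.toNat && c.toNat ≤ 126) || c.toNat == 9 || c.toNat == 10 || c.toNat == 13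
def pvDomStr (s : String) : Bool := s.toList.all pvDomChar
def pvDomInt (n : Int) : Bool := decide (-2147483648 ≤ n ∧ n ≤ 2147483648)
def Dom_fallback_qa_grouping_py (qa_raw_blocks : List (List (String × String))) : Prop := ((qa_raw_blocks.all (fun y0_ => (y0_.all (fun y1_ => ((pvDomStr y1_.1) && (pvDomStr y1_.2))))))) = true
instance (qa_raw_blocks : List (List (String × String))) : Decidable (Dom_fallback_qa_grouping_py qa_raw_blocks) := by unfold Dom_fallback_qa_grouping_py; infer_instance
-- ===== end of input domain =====

-- B replaces A's nested index-jumping while-loops by one flat pass with an optional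
-- current group (objective: simpler). Equivalence is on the RETURN value.

-- dict access blk["speaker_type_hint"]: first match in the association list; on the
-- admitted inputs (Pre_) the key is present, so the "" default is never consulted.
def pvHint (blk : List (String × String)) : String :=
  (List.lookup "speaker_type_hint" blk).getD ""

-- ===== PORT A =====
-- inner while: collect the consecutive 'a' blocks, return (collected, remaining suffix)
def pvTakeA : List (List (String × String)) → (List (List (String × String)) × List (List (String × String)))
  | [] => ([], [])
  | blk :: rest =>
    if pvHint blk == "a" then
      let p := pvTakeA rest
      (blk :: p.1, p.2)
    else ([], blk :: rest)

theorem pvTakeA_len (l : List (List (String × String))) : (pvTakeA l).2.length ≤ l.length := by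
  induction l with
  | nil => simp [pvTakeA]
  | cons blk rest ih =>
    simp only [pvTakeA]
    split
    · exact Nat.le_succ_of_le ih
    · simp

-- outer while over index i; the jump i := j is recursing on the suffix pvTakeA leaves
def fallback_qa_grouping_py : List (List (String × String)) → List (List (List (String × String)))
  | [] => []
  | blk :: rest =>
    if pvHint blk == "q" then
      let p := pvTakeA rest
      (blk :: p.1) :: fallback_qa_grouping_py p.2
    else fallback_qa_grouping_py rest
termination_by l => l.length
decreasing_by
  · exact Nat.lt_succ_of_le (pvTakeA_len rest)
  · simp

-- ===== PORT B =====
-- flush the current group into conversations (the 'if current is not None: append')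
def pvFlush (convs : List (List (List (String × String)))) :
    Option (List (List (String × String))) → List (List (List (String × String)))
  | none => convs
  | some g => convs ++ [g]

-- one iteration of B's for-loop body over the state (conversations, current)
def pvStepB (st : List (List (List (String × String))) × Option (List (List (String × String))))
    (blk : List (String × String)) :
    List (List (List (String × String))) × Option (List (List (String × String))) :=
  let hint := pvHint blk
  if hint == "q" then (pvFlush st.1 st.2, some [blk])
  else if hint == "a" then (st.1, st.2.map (fun g => g ++ [blk]))
  else (pvFlush st.1 st.2, none)

def fallback_qa_grouping_py_alt (qa_raw_blocks : List (List (String × String))) : List (List (List (String × String))) :=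
  let st := qa_raw_blocks.foldl pvStepB ([], none)
  pvFlush st.1 st.2

-- ===== PRECONDITION & SPEC =====
-- Pre_ excludes exactly the blocks without the "speaker_type_hint" key, on which A raises KeyError.
def Pre_fallback_qa_grouping_py (qa_raw_blocks : List (List (String × String))) : Prop :=
  ∀ blk ∈ qa_raw_blocks, (List.lookup "speaker_type_hint" blk).isSome = true
instance (qa_raw_blocks : List (List (String × String))) : Decidable (Pre_fallback_qa_grouping_py qa_raw_blocks) := by unfold Pre_fallback_qa_grouping_py; infer_instance
def pvWitness_fallback_qa_grouping_py : (List (List (String × String))) :=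
  [[("speaker_type_hint", "q")], [("speaker_type_hint", "a")], [("speaker_type_hint", "op")]]
def Spec_fallback_qa_grouping_py (qa_raw_blocks : List (List (String × String))) (out : List (List (List (String × String)))) : Prop := out = fallback_qa_grouping_py_alt qa_raw_blocks
instance (qa_raw_blocks : List (List (String × String))) (out : List (List (List (String × String)))) : Decidable (Spec_fallback_qa_grouping_py qa_raw_blocks out) := by unfold Spec_fallback_qa_grouping_py; infer_instance

-- ===== CLAIM (what is proved, stated in full; the proofs are below) =====
def Claim_equal_fallback_qa_grouping_py : Prop := ∀ (qa_raw_blocks : List (List (String × String))), Dom_fallback_qa_grouping_py qa_raw_blocks → Pre_fallback_qa_grouping_py qa_raw_blocks → Spec_fallback_qa_grouping_py qa_raw_blocks (fallback_qa_grouping_py qa_raw_blocks)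

-- ===== LEMMAS AND PROOFS =====

-- loop invariant: finishing B's fold from state (convs, cur) yields convs, the group
-- cur extended by the leading 'a' blocks (when cur is open), then A's grouping of the rest
theorem pvFold_key (l : List (List (String × String)))
    (convs : List (List (List (String × String)))) (cur : Option (List (List (String × String)))) :
    pvFlush (l.foldl pvStepB (convs, cur)).1 (l.foldl pvStepB (convs, cur)).2 =
      match cur with
      | none => convs ++ fallback_qa_grouping_py l
      | some g => convs ++ (g ++ (pvTakeA l).1) :: fallback_qa_grouping_py (pvTakeA l).2 := by
  induction l generalizing convs cur with
  | nil => cases cur <;> simp [pvFlush, pvTakeA, fallback_qa_grouping_py]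
  | cons blk rest ih =>
    by_cases hq : pvHint blk == "q"
    · have step : pvStepB (convs, cur) blk = (pvFlush convs cur, some [blk]) := by
        simp [pvStepB, hq]
      cases cur with
      | none =>
        simp only [List.foldl_cons, step, ih]
        simp [pvFlush, fallback_qa_grouping_py, hq]
      | some g =>
        have hna : ¬ (pvHint blk == "a") = true := by
          intro h; rw [beq_iff_eq] at hq h; simp [h] at hq
        simp only [List.foldl_cons, step, ih]
        simp [pvFlush, pvTakeA, hna, fallback_qa_grouping_py, hq]
    · by_cases ha : pvHint blk == "a"
      · cases cur with
        | none =>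
          have step : pvStepB (convs, none) blk = (convs, none) := by
            simp [pvStepB, hq, ha]
          simp only [List.foldl_cons, step, ih]
          simp [fallback_qa_grouping_py, hq]
        | some g =>
          have step : pvStepB (convs, some g) blk = (convs, some (g ++ [blk])) := by
            simp [pvStepB, hq, ha]
          simp only [List.foldl_cons, step, ih]
          simp [pvTakeA, ha]
      · have step : pvStepB (convs, cur) blk = (pvFlush convs cur, none) := by
          simp [pvStepB, hq, ha]
        cases cur with
        | none =>
          simp only [List.foldl_cons, step, ih]
          simp [pvFlush, fallback_qa_grouping_py, hq]
        | some g =>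
          simp only [List.foldl_cons, step, ih]
          simp [pvFlush, pvTakeA, ha, fallback_qa_grouping_py, hq]

-- ===== VERDICT (by name: the statement is the Claim_ definition above) =====
theorem fallback_qa_grouping_py_spec : Claim_equal_fallback_qa_grouping_py := by
  intro qa _ _
  unfold Spec_fallback_qa_grouping_py fallback_qa_grouping_py_alt
  simpa using (pvFold_key qa [] none).symm
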